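-- pv_equiv track=rewrite | github.com/Wchoi189/upstageailab-ocr-recsys-competition-ocr-2 | ocr/data/datasets/preprocessing/detector.py | _filter_corners
-- ===== SOURCE A (Python) =====
-- import math
--
-- def _filter_corners(corners: list[tuple[int, int]]) -> list[tuple[int, int]]:
--     """Filter corners to remove duplicates and points that are too close."""
--
--     def distance(p1, p2):
--         return math.sqrt((p1[0] - p2[0]) ** 2 + (p1[1] - p2[1]) ** 2)
--
--     filtered_corners: list[tuple[int, int]] = []
--     for c in corners:
--         should_add = True
--         for existing in filtered_corners:
--             if distance(c, existing) < 10:  # Minimum distance threshold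
--                 should_add = False
--                 break
--         if should_add:
--             filtered_corners.append(c)
--
--     return filtered_corners
-- ===== SOURCE B (Python) =====
-- def _filter_corners(corners: list[tuple[int, int]]) -> list[tuple[int, int]]:
--     """Sieve-style: keep the first remaining corner, then drop every remaining
--     corner within distance 10 of it (exact integer squared-distance test:
--     sqrt(d2) < 10  iff  d2 < 100 for integer d2)."""
--     kept: list[tuple[int, int]] = []
--     remaining = list(corners)
--     while remaining:
--         c = remaining[0]
--         kept.append(c)
--         cx, cy = c
--         remaining = [q for q in remaining[1:]
--                      if (q[0] - cx) ** 2 + (q[1] - cy) ** 2 >= 100]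
--     return kept
-- ===== Notes on version B (the rewrite author's own statement) =====
-- stated objective: alternative
-- what changed: A tests each candidate against every previously kept point (inner scan over the kept list); B is a sieve: it keeps the head of the remaining list and filters out all remaining points within distance 10 of it, using an exact integer squared-distance comparison instead of math.sqrt.
import Mathlib
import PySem

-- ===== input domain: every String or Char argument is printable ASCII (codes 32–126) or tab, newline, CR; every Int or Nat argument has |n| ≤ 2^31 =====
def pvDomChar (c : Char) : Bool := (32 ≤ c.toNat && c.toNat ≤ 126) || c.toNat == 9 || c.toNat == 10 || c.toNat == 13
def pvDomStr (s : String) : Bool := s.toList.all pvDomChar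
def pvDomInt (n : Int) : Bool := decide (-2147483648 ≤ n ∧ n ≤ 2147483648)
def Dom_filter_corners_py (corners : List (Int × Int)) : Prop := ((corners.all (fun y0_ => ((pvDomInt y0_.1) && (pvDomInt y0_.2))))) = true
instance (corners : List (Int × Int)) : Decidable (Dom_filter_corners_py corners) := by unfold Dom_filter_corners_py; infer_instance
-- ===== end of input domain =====

-- B replaces A's per-candidate scan over the kept list by a sieve (keep head, filter out
-- the remaining points near it); same values, alternative structure (objective: alternative).

-- ===== PORT A =====
-- squared distance; Python compares math.sqrt(d2) < 10, which for an integer d2 ≥ 0 is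
-- exactly d2 < 100 (IEEE sqrt is correctly rounded and monotone, 10 and 100 are exact
-- doubles, and every integer d2 ≤ 99 is exact), so the port compares d2 < 100 — exact on Dom.
def pvSq (p q : Int × Int) : Int := (p.1 - q.1) ^ 2 + (p.2 - q.2) ^ 2

-- the for-loop with its break: should_add = no kept point at distance < 10 (= List.any)
def filter_corners_py (corners : List (Int × Int)) : List (Int × Int) :=
  corners.foldl
    (fun filtered c =>
      if filtered.any (fun existing => decide (pvSq c existing < 100)) then filtered
      else filtered ++ [c])
    []

-- ===== PORT B =====
-- the while-loop of Source B as structural recursion on the shrinking `remaining` list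
def filter_corners_py_alt (corners : List (Int × Int)) : List (Int × Int) :=
  match corners with
  | [] => []
  | c :: rest =>
      c :: filter_corners_py_alt (rest.filter (fun q => decide (100 ≤ pvSq q c)))
termination_by corners.length
decreasing_by
  simp only [List.length_unattach, List.length_cons, Nat.lt_succ_iff]
  exact le_trans (List.length_filter_le _ _) (by simp)

-- ===== PRECONDITION & SPEC =====
def Spec_filter_corners_py (corners : List (Int × Int)) (out : List (Int × Int)) : Prop := out = filter_corners_py_alt corners
instance (corners : List (Int × Int)) (out : List (Int × Int)) : Decidable (Spec_filter_corners_py corners out) := by unfold Spec_filter_corners_py; infer_instance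

-- ===== CLAIM (what is proved, stated in full; the proofs are below) =====
def Claim_equal_filter_corners_py : Prop := ∀ (corners : List (Int × Int)), Dom_filter_corners_py corners → Spec_filter_corners_py corners (filter_corners_py corners)

-- ===== LEMMAS AND PROOFS =====

theorem pvSq_comm (p q : Int × Int) : pvSq p q = pvSq q p := by
  unfold pvSq; ring

theorem pvAlt_nil : filter_corners_py_alt [] = [] := by
  rw [filter_corners_py_alt.eq_def]

theorem pvAlt_cons (c : Int × Int) (rest : List (Int × Int)) :
    filter_corners_py_alt (c :: rest)
      = c :: filter_corners_py_alt (rest.filter (fun q => decide (100 ≤ pvSq q c))) := by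
  rw [filter_corners_py_alt.eq_def]

-- loop invariant: A's fold from accumulator `acc` appends B's sieve applied to the
-- candidates still far from everything in `acc`
theorem pvFold_eq_sieve (cs : List (Int × Int)) : ∀ (acc : List (Int × Int)),
    cs.foldl
      (fun filtered c =>
        if filtered.any (fun existing => decide (pvSq c existing < 100)) then filtered
        else filtered ++ [c]) acc
      = acc ++ filter_corners_py_alt
          (cs.filter (fun c => !(acc.any (fun existing => decide (pvSq c existing < 100))))) := by
  induction cs with
  | nil => intro acc; simp [pvAlt_nil]
  | cons c cs ih =>
    intro acc
    by_cases h : acc.any (fun existing => decide (pvSq c existing < 100)) = true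
    · simp only [List.foldl_cons, List.filter_cons, h, if_pos, Bool.not_true]
      simpa using ih acc
    · simp only [List.foldl_cons, if_neg h, List.filter_cons,
        Bool.not_eq_true] at *
      rw [ih (acc ++ [c])]
      simp only [h, Bool.not_false, if_pos, pvAlt_cons, List.filter_filter,
        List.append_assoc, List.singleton_append]
      congr 2
      apply congrArg
      apply List.filter_congr
      intro q _
      simp only [List.any_append, List.any_cons, List.any_nil, Bool.or_false,
        Bool.not_or, Bool.and_comm]
      rw [pvSq_comm q c]
      simp [← decide_not]

-- ===== VERDICT (by name: the statement is the Claim_ definition above) =====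
theorem filter_corners_py_spec : Claim_equal_filter_corners_py := by
  intro corners _
  unfold Spec_filter_corners_py filter_corners_py
  rw [pvFold_eq_sieve corners []]
  simp
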